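-- pv_equiv track=rewrite | github.com/the-brainiac/contests | codechef/may21b/modfq.py | solve
-- ===== SOURCE A (Python) =====
-- def solve(n, m):
--     res = 0
--     # sets greater than m
--     if n>m:
--         tn = n-m
--         res += (tn*(tn+1))//2
--     else:
--         tn = 0
--     res += (m-1)*tn
--     last = min(n,m)
--     for b in range(1,last+1):
--         res += last//b -1
--     return res
-- ===== SOURCE B (Python) =====
-- def solve(n, m):
--     # faster: divisor-summatory sum computed by the hyperbola (sqrt) method
--     tn = n - m if n > m else 0
--     res = tn * (tn + 1) // 2 + (m - 1) * tn
--     last = n if n < m else m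
--     if last >= 1:
--         total = 0
--         s = 0
--         i = 1
--         while i * i <= last:
--             total += last // i
--             s = i
--             i += 1
--         res += 2 * total - s * s - last
--     return res
-- ===== Notes on version B (the rewrite author's own statement) =====
-- stated objective: faster
-- what changed: The O(last) loop summing last//b for b=1..last is replaced by the Dirichlet hyperbola identity: sum_{b<=last} last//b = 2*sum_{i<=sqrt(last)} last//i - floor(sqrt(last))^2, computed in O(sqrt(last)).
import Mathlib
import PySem

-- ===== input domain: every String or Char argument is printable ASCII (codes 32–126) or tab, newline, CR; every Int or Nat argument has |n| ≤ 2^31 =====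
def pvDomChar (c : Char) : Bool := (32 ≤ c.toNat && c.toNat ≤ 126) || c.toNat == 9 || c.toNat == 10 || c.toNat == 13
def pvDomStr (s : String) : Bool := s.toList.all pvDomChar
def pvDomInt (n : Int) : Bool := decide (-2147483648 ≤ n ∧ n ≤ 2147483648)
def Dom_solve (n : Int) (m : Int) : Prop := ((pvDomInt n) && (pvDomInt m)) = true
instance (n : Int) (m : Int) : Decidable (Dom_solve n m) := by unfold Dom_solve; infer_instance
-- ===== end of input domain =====

-- B replaces A's O(min(n,m)) loop summing last//b by the Dirichlet hyperbola identity, O(sqrt(min(n,m))).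

-- ===== PORT A =====
def solve (n : Int) (m : Int) : Int :=
  -- res = 0; if n>m: tn = n-m; res += tn*(tn+1)//2 else tn = 0
  let p : Int × Int :=
    if n > m then (0 + PySem.Int.floordiv ((n - m) * ((n - m) + 1)) 2, n - m)
    else (0, 0)
  -- res += (m-1)*tn
  let res : Int := p.1 + (m - 1) * p.2
  let last : Int := min n m
  -- for b in range(1, last+1): res += last//b - 1
  (PySem.List.pyRange 1 (last + 1) 1).foldl (fun r b => r + PySem.Int.floordiv last b - 1) res

-- ===== PORT B =====
-- the `while i*i <= last` loop of Source B; all values there are nonnegative, so Nat arithmetic is exact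
def hypLoop (L : Nat) (i : Nat) (total : Nat) (s : Nat) : Nat × Nat :=
  if _h : i * i ≤ L then hypLoop L (i + 1) (total + L / i) i
  else (total, s)
termination_by L + 1 - i
decreasing_by
  have : i = 0 ∨ i ≤ i * i := by
    rcases Nat.eq_zero_or_pos i with h0 | h0
    · exact Or.inl h0
    · exact Or.inr (Nat.le_mul_of_pos_left i h0)
  omega

def solve_alt (n : Int) (m : Int) : Int :=
  let tn : Int := if n > m then n - m else 0
  let res : Int := PySem.Int.floordiv (tn * (tn + 1)) 2 + (m - 1) * tn
  let last : Int := if n < m then n else m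
  if 1 ≤ last then
    let p := hypLoop last.toNat 1 0 0
    res + (2 * (p.1 : Int) - (p.2 : Int) * (p.2 : Int) - last)
  else res

-- ===== PRECONDITION & SPEC =====
def Spec_solve (n : Int) (m : Int) (out : Int) : Prop := out = solve_alt n m
instance (n : Int) (m : Int) (out : Int) : Decidable (Spec_solve n m out) := by unfold Spec_solve; infer_instance

-- ===== CLAIM (what is proved, stated in full; the proofs are below) =====
def Claim_equal_solve : Prop := ∀ (n : Int) (m : Int), Dom_solve n m → Spec_solve n m (solve n m)

-- ===== LEMMAS AND PROOFS =====

lemma sqrt_sq_le (L : Nat) : Nat.sqrt L * Nat.sqrt L ≤ L := Nat.sqrt_le L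

lemma lt_succ_sqrt_sq (L : Nat) : L < (Nat.sqrt L + 1) * (Nat.sqrt L + 1) := Nat.lt_succ_sqrt L

lemma Icc_succ_eq_Ioc (a b : Nat) : Finset.Icc (a + 1) b = Finset.Ioc a b := by
  ext x; simp only [Finset.mem_Icc, Finset.mem_Ioc]; omega

lemma filter_le_Icc (l h k : Nat) :
    (Finset.Icc l h).filter (fun a => a ≤ k) = Finset.Icc l (min h k) := by
  ext a; simp [Finset.mem_Icc, Finset.mem_filter]; omega

lemma filter_le_Ioc (l h k : Nat) :
    (Finset.Ioc l h).filter (fun b => b ≤ k) = Finset.Ioc l (min h k) := by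
  ext b; simp [Finset.mem_Ioc, Finset.mem_filter]; omega

-- characterisation of B's while-loop
lemma hypLoop_eq (L i total s : Nat) :
    hypLoop L i total s =
      if i * i ≤ L then (total + ∑ j ∈ Finset.Icc i (Nat.sqrt L), L / j, Nat.sqrt L)
      else (total, s) := by
  induction i, total, s using hypLoop.induct L with
  | case1 i total s h ih =>
    rw [hypLoop, dif_pos h, ih, if_pos h]
    have hle : i ≤ Nat.sqrt L := Nat.le_sqrt.mpr h
    by_cases h2 : (i + 1) * (i + 1) ≤ L
    · have hle2 : i + 1 ≤ Nat.sqrt L := Nat.le_sqrt.mpr h2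
      rw [if_pos h2]
      have hins : Finset.Icc i (Nat.sqrt L) = insert i (Finset.Ioc i (Nat.sqrt L)) :=
        (Finset.Ioc_insert_left hle).symm
      rw [hins, Finset.sum_insert (by simp), ← Icc_succ_eq_Ioc, add_assoc]
    · have hlt : Nat.sqrt L < i + 1 := by
        by_contra hc
        push Not at hc
        exact h2 (le_trans (Nat.mul_le_mul hc hc) (sqrt_sq_le L))
      have hseq : Nat.sqrt L = i := by omega
      rw [if_neg h2, hseq, Finset.Icc_self, Finset.sum_singleton]
  | case2 i total s h =>
    rw [hypLoop]; simp [h]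

-- the Dirichlet hyperbola identity, in Nat
lemma hyperbola (L : Nat) (hL : 1 ≤ L) :
    ∑ b ∈ Finset.Icc 1 L, L / b + Nat.sqrt L * Nat.sqrt L
      = 2 * ∑ b ∈ Finset.Icc 1 (Nat.sqrt L), L / b := by
  set s := Nat.sqrt L with hs
  have hssL : s * s ≤ L := sqrt_sq_le L
  have hLss : L < (s + 1) * (s + 1) := lt_succ_sqrt_sq L
  have hsL : s ≤ L := Nat.sqrt_le_self L
  have hs1 : 1 ≤ s := by
    have := Nat.sqrt_pos.mpr (show 0 < L by omega)
    omega
  -- split the long sum at s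
  have hsplit : ∑ b ∈ Finset.Icc 1 L, L / b
      = ∑ b ∈ Finset.Icc 1 s, L / b + ∑ b ∈ Finset.Ioc s L, L / b := by
    rw [show (1 : Nat) = 0 + 1 from rfl, Icc_succ_eq_Ioc, Icc_succ_eq_Ioc,
        Finset.sum_Ioc_consecutive _ (Nat.zero_le s) hsL]
  -- bound the quotients in the tail
  have hdiv_le : ∀ b ∈ Finset.Ioc s L, L / b ≤ s := by
    intro b hb
    rw [Finset.mem_Ioc] at hb
    have h1 : L / b ≤ L / (s + 1) := Nat.div_le_div_left (by omega) (by omega)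
    have h2 : L / (s + 1) < s + 1 := Nat.div_lt_iff_lt_mul (by omega) |>.mpr hLss
    exact Nat.lt_succ_iff.mp (lt_of_le_of_lt h1 h2)
  -- tail counted the other way round (double counting of {(a,b) : a*b ≤ L, b > s})
  have step1 : ∑ b ∈ Finset.Ioc s L, L / b
      = ∑ b ∈ Finset.Ioc s L, ∑ a ∈ Finset.Icc 1 s, (if a * b ≤ L then 1 else 0) := by
    refine Finset.sum_congr rfl (fun b hb => ?_)
    have hbpos : 0 < b := by
      rw [Finset.mem_Ioc] at hb; omega
    calc L / b = (Finset.Icc 1 (min s (L / b))).card := by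
            rw [Nat.card_Icc, Nat.min_eq_right (hdiv_le b hb)]
            exact (Nat.add_sub_cancel _ _).symm
      _ = ((Finset.Icc 1 s).filter (fun a => a ≤ L / b)).card := by rw [filter_le_Icc]
      _ = ∑ a ∈ Finset.Icc 1 s, (if a ≤ L / b then 1 else 0) := Finset.card_filter _ _
      _ = ∑ a ∈ Finset.Icc 1 s, (if a * b ≤ L then 1 else 0) := by
            refine Finset.sum_congr rfl (fun a _ => ?_)
            simp [(Nat.le_div_iff_mul_le hbpos).symm]
  have step3 : ∀ a ∈ Finset.Icc 1 s,
      ∑ b ∈ Finset.Ioc s L, (if a * b ≤ L then 1 else 0) = L / a - s := by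
    intro a ha
    rw [Finset.mem_Icc] at ha
    have hapos : 0 < a := by omega
    have hcond : ∀ b, (a * b ≤ L) ↔ (b ≤ L / a) := by
      intro b
      rw [Nat.le_div_iff_mul_le hapos, Nat.mul_comm]
    calc ∑ b ∈ Finset.Ioc s L, (if a * b ≤ L then 1 else 0)
        = ∑ b ∈ Finset.Ioc s L, (if b ≤ L / a then 1 else 0) := by
          refine Finset.sum_congr rfl (fun b _ => ?_); simp [hcond b]
      _ = ((Finset.Ioc s L).filter (fun b => b ≤ L / a)).card := (Finset.card_filter _ _).symm
      _ = (Finset.Ioc s (min L (L / a))).card := by rw [filter_le_Ioc]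
      _ = L / a - s := by
          rw [Nat.card_Ioc, Nat.min_eq_right (Nat.div_le_self L a)]
  have hsla : ∀ a ∈ Finset.Icc 1 s, s ≤ L / a := by
    intro a ha
    rw [Finset.mem_Icc] at ha
    rw [Nat.le_div_iff_mul_le (by omega)]
    nlinarith
  have hconst : ∑ _a ∈ Finset.Icc 1 s, s = s * s := by
    rw [Finset.sum_const, Nat.card_Icc, smul_eq_mul]
    have : s + 1 - 1 = s := by omega
    rw [this]
  have htail : ∑ b ∈ Finset.Ioc s L, L / b + s * s = ∑ a ∈ Finset.Icc 1 s, L / a := by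
    rw [step1, Finset.sum_comm, Finset.sum_congr rfl step3, ← hconst,
        ← Finset.sum_add_distrib]
    refine Finset.sum_congr rfl (fun a ha => ?_)
    exact Nat.sub_add_cancel (hsla a ha)
  rw [hsplit]
  omega

-- A's loop as a Finset sum
lemma solve_loop_sum (last : Int) (res : Int) (h : 1 ≤ last) :
    (PySem.List.pyRange 1 (last + 1) 1).foldl
        (fun r b => r + PySem.Int.floordiv last b - 1) res
      = res + (∑ b ∈ Finset.Icc 1 last.toNat, ((last.toNat / b : Nat) : Int)) - last := by
  have hrw : (PySem.List.pyRange 1 (last + 1) 1).foldl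
        (fun r b => r + PySem.Int.floordiv last b - 1) res
      = (PySem.List.pyRange 1 (last + 1) 1).foldl
        (fun r b => r + (PySem.Int.floordiv last b - 1)) res := by
    simp only [add_sub_assoc]
  rw [hrw, PySem.List.foldl_add, PySem.List.pyRange_one]
  have hL : (last + 1 - 1).toNat = last.toNat := by omega
  rw [hL]
  have hmap : ((List.range last.toNat).map (fun k : Nat => (1 : Int) + k)).map
        (fun b => PySem.Int.floordiv last b - 1)
      = (List.range last.toNat).map
        (fun k : Nat => ((last.toNat / (1 + k) : Nat) : Int) - (1 : Int)) := by
    rw [List.map_map]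
    refine List.map_congr_left (fun k _ => ?_)
    show PySem.Int.floordiv last ((1 : Int) + k) - 1
        = ((last.toNat / (1 + k) : Nat) : Int) - 1
    have hfl : PySem.Int.floordiv last ((1 : Int) + k) = ((last.toNat / (1 + k) : Nat) : Int) := by
      conv_lhs => rw [show last = ((last.toNat : Nat) : Int) by omega,
                      show ((1 : Int) + k) = ((1 + k : Nat) : Int) by push_cast; ring]
      exact PySem.Int.floordiv_natCast _ _
    rw [hfl]
  rw [hmap]
  have hsum : ((List.range last.toNat).map
        (fun k : Nat => ((last.toNat / (1 + k) : Nat) : Int) - (1 : Int))).sum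
      = ∑ k ∈ Finset.range last.toNat, (((last.toNat / (1 + k) : Nat) : Int) - (1 : Int)) := rfl
  rw [hsum, Finset.sum_sub_distrib, Finset.sum_const, Finset.card_range, nsmul_eq_mul, mul_one]
  have hre : ∑ b ∈ Finset.Icc 1 last.toNat, ((last.toNat / b : Nat) : Int)
      = ∑ k ∈ Finset.range last.toNat, ((last.toNat / (1 + k) : Nat) : Int) := by
    rw [show Finset.Icc 1 last.toNat = Finset.Ico 1 (last.toNat + 1) by
          ext x; simp only [Finset.mem_Icc, Finset.mem_Ico]; omega,
        Finset.sum_Ico_eq_sum_range]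
    simp [add_comm]
  rw [hre]
  have : ((last.toNat : Nat) : Int) = last := by omega
  rw [this]
  ring

-- ===== VERDICT (by name: the statement is the Claim_ definition above) =====
theorem solve_spec : Claim_equal_solve := by
  intro n m _
  unfold Spec_solve solve solve_alt
  have hmin : min n m = if n < m then n else m := by
    rcases lt_trichotomy n m with h | h | h <;> simp [h, le_of_lt]
  have hres : (if n > m then (0 + PySem.Int.floordiv ((n - m) * ((n - m) + 1)) 2, n - m)
        else ((0 : Int), (0 : Int))).1
      + (m - 1) * (if n > m then (0 + PySem.Int.floordiv ((n - m) * ((n - m) + 1)) 2, n - m)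
        else ((0 : Int), (0 : Int))).2
      = PySem.Int.floordiv ((if n > m then n - m else 0) * ((if n > m then n - m else 0) + 1)) 2
        + (m - 1) * (if n > m then n - m else 0) := by
    by_cases h : n > m <;> simp [h, PySem.Int.floordiv]
  simp only []
  rw [← hmin]
  set last : Int := min n m with hlast
  by_cases hpos : 1 ≤ last
  · rw [solve_loop_sum last _ hpos, if_pos hpos, hres]
    have hL1 : 1 ≤ last.toNat := by omega
    have hloop := hypLoop_eq last.toNat 1 0 0
    rw [if_pos (show 1 * 1 ≤ last.toNat by omega)] at hloop
    rw [hloop]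
    simp only [Nat.zero_add]
    have hkey : (∑ b ∈ Finset.Icc 1 last.toNat, ((last.toNat / b : Nat) : Int))
        = 2 * ((∑ j ∈ Finset.Icc 1 (Nat.sqrt last.toNat), last.toNat / j : Nat) : Int)
          - ((Nat.sqrt last.toNat : Int) * (Nat.sqrt last.toNat : Int)) := by
      have hh := hyperbola last.toNat hL1
      have hcast : ((∑ b ∈ Finset.Icc 1 last.toNat, last.toNat / b : Nat) : Int)
          + ((Nat.sqrt last.toNat : Int) * (Nat.sqrt last.toNat : Int))
          = 2 * ((∑ j ∈ Finset.Icc 1 (Nat.sqrt last.toNat), last.toNat / j : Nat) : Int) := by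
        exact_mod_cast congrArg (fun x : Nat => (x : Int)) hh
      push_cast at hcast ⊢
      omega
    rw [hkey]
    ring
  · rw [if_neg hpos, PySem.List.pyRange_one_eq_nil (by omega), List.foldl_nil, hres]
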